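-- pv_equiv track=rewrite | github.com/yangjing6688/framework | ExtremeAutomation/Apis/NetworkElement/GeneratedApis/ParseApis/CLI/spbm/VOSS/base/baseversion/baseunit/SpbmCustomShowTools.py | check_isis_spbm_ipv6_unicast_fib_out_port
-- ===== SOURCE A (Python) =====
-- def check_isis_spbm_ipv6_unicast_fib_out_port(output, args, **kwargs):
--     ret_ipv6_unicast_fib_out_port = None
--     for line in output.splitlines():
--         if len(line) > 1:
--             if line.split()[0] == "GRT":
--                 found_dest = line.split()[2]
--                 found_nh_beb = line.split()[3]
--                 found_bvlan = line.split()[4]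
--                 found_out_int = line.split()[5]
--                 ret_ipv6_unicast_fib_out_port = {"ret_found_dest": found_dest,
--                                                  "ret_found_nh_beb": found_nh_beb,
--                                                  "ret_found_bvlan": found_bvlan,
--                                                  "ret_found_out_int": found_out_int}
--
--                 if found_dest == args["dest"] and found_nh_beb == args["nh_beb"] and found_bvlan == \
--                         args["bvlan"] and found_out_int == args["port"]:
--                     return True, ret_ipv6_unicast_fib_out_port
--     return False, ret_ipv6_unicast_fib_out_port
-- ===== SOURCE B (Python) =====
-- def check_isis_spbm_ipv6_unicast_fib_out_port(output, args, **kwargs):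
--     # Parse-then-match: first collect every GRT entry, then look for the match.
--     entries = []
--     for line in output.splitlines():
--         if len(line) > 1:
--             t = line.split()
--             if t[0] == "GRT":
--                 entries.append({"ret_found_dest": t[2],
--                                 "ret_found_nh_beb": t[3],
--                                 "ret_found_bvlan": t[4],
--                                 "ret_found_out_int": t[5]})
--     for e in entries:
--         if e["ret_found_dest"] == args["dest"] and e["ret_found_nh_beb"] == args["nh_beb"] \
--                 and e["ret_found_bvlan"] == args["bvlan"] and e["ret_found_out_int"] == args["port"]:
--             return True, e
--     return False, entries[-1] if entries else None
-- ===== Notes on version B (the rewrite author's own statement) =====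
-- stated objective: alternative
-- what changed: Replaced A's single interleaved scan (parse + compare + last-entry bookkeeping inside one loop with mid-loop return) by a two-phase shape: parse all GRT lines into an entry list first, then search that list for the first matching entry, falling back to (False, entries[-1] or None).
import Mathlib
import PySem

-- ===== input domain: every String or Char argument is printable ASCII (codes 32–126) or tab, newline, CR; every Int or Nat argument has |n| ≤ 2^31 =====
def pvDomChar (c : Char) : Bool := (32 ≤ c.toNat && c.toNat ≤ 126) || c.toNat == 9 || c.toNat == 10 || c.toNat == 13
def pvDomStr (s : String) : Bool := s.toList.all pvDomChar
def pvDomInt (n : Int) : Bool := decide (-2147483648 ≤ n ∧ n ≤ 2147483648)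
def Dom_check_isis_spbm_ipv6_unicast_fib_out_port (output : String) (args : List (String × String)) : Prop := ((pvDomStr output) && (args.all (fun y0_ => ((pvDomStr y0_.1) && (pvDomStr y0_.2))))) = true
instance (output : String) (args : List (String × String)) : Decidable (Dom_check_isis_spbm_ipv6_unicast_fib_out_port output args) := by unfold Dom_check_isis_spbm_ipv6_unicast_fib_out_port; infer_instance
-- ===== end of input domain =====

-- B re-decomposes A's single interleaved scan into parse-all-GRT-entries then find-first-match
-- (equal values proved on Pre_; same cost, 'alternative').

-- dict[k] lookup on an association list (first match), total form used under Pre_ (key present)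
def pvLook (d : List (String × String)) (k : String) : String :=
  (PySem.Dict.mk d).getD k ""

-- ===== PORT A =====
-- A's loop: one pass carrying the last-seen entry, early return on a match
def pvLoopA (args : List (String × String)) :
    List String → Option (List (String × String)) → Bool × (Option (List (String × String)))
  | [], ret => (false, ret)
  | line :: rest, ret =>
    if 1 < PySem.Str.len line then
      match PySem.Str.split₀ line with
      | t0 :: _ :: t2 :: t3 :: t4 :: t5 :: _ =>
        if t0 = "GRT" then
          let entry : List (String × String) :=
            [("ret_found_dest", t2), ("ret_found_nh_beb", t3),
             ("ret_found_bvlan", t4), ("ret_found_out_int", t5)]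
          if t2 = pvLook args "dest" ∧ t3 = pvLook args "nh_beb" ∧
             t4 = pvLook args "bvlan" ∧ t5 = pvLook args "port" then
            (true, some entry)
          else
            pvLoopA args rest (some entry)
        else pvLoopA args rest ret
      | _ => pvLoopA args rest ret  -- IndexError in Python; outside Pre_
    else pvLoopA args rest ret

def check_isis_spbm_ipv6_unicast_fib_out_port (output : String) (args : List (String × String)) : Bool × (Option (List (String × String))) :=
  pvLoopA args (PySem.Str.splitlines output) none

-- ===== PORT B =====
-- B phase 1: collect every GRT entry
def pvParseB : List String → List (List (String × String))
  | [] => []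
  | line :: rest =>
    if 1 < PySem.Str.len line then
      match PySem.Str.split₀ line with
      | t0 :: _ :: t2 :: t3 :: t4 :: t5 :: _ =>
        if t0 = "GRT" then
          [("ret_found_dest", t2), ("ret_found_nh_beb", t3),
           ("ret_found_bvlan", t4), ("ret_found_out_int", t5)] :: pvParseB rest
        else pvParseB rest
      | _ => pvParseB rest  -- IndexError in Python; outside Pre_
    else pvParseB rest

-- B phase 2: does an entry match the four requested fields?
def pvMatchB (args e : List (String × String)) : Bool :=
  pvLook e "ret_found_dest" == pvLook args "dest" &&
  pvLook e "ret_found_nh_beb" == pvLook args "nh_beb" &&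
  pvLook e "ret_found_bvlan" == pvLook args "bvlan" &&
  pvLook e "ret_found_out_int" == pvLook args "port"

def check_isis_spbm_ipv6_unicast_fib_out_port_alt (output : String) (args : List (String × String)) : Bool × (Option (List (String × String))) :=
  let entries := pvParseB (PySem.Str.splitlines output)
  match entries.find? (pvMatchB args) with
  | some e => (true, some e)
  | none => (false, entries.getLast?)  -- entries[-1] if entries else None

-- ===== PRECONDITION & SPEC =====
-- Pre_ excludes the inputs where the Pythons raise: a line longer than 1 char with no tokens
-- (IndexError on split()[0]), a GRT line with fewer than 6 tokens (IndexError), and — slightly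
-- conservatively — any input with a GRT line while args lacks one of the four keys (KeyError;
-- A can still return there when an earlier field mismatch short-circuits past the missing key,
-- and B returns the same value in those cases).
def Pre_check_isis_spbm_ipv6_unicast_fib_out_port (output : String) (args : List (String × String)) : Prop :=
  ∀ line ∈ PySem.Str.splitlines output, 1 < PySem.Str.len line →
    PySem.Str.split₀ line ≠ [] ∧
    ((PySem.Str.split₀ line).head? = some "GRT" →
      6 ≤ (PySem.Str.split₀ line).length ∧
      ((PySem.Dict.mk args).get? "dest").isSome ∧
      ((PySem.Dict.mk args).get? "nh_beb").isSome ∧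
      ((PySem.Dict.mk args).get? "bvlan").isSome ∧
      ((PySem.Dict.mk args).get? "port").isSome)

instance (output : String) (args : List (String × String)) : Decidable (Pre_check_isis_spbm_ipv6_unicast_fib_out_port output args) := by unfold Pre_check_isis_spbm_ipv6_unicast_fib_out_port; infer_instance

def pvWitness_check_isis_spbm_ipv6_unicast_fib_out_port : String × (List (String × String)) :=
  ("header\nGRT x 1:2::3/64 beb1 100 1/1\n", [("dest", "1:2::3/64"), ("nh_beb", "beb1"), ("bvlan", "100"), ("port", "1/1")])

def Spec_check_isis_spbm_ipv6_unicast_fib_out_port (output : String) (args : List (String × String)) (out : Bool × (Option (List (String × String)))) : Prop := out = check_isis_spbm_ipv6_unicast_fib_out_port_alt output args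
instance (output : String) (args : List (String × String)) (out : Bool × (Option (List (String × String)))) : Decidable (Spec_check_isis_spbm_ipv6_unicast_fib_out_port output args out) := by unfold Spec_check_isis_spbm_ipv6_unicast_fib_out_port; infer_instance

-- ===== CLAIM (what is proved, stated in full; the proofs are below) =====
def Claim_equal_check_isis_spbm_ipv6_unicast_fib_out_port : Prop := ∀ (output : String) (args : List (String × String)), Dom_check_isis_spbm_ipv6_unicast_fib_out_port output args → Pre_check_isis_spbm_ipv6_unicast_fib_out_port output args → Spec_check_isis_spbm_ipv6_unicast_fib_out_port output args (check_isis_spbm_ipv6_unicast_fib_out_port output args)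

-- ===== LEMMAS AND PROOFS =====

-- A's scan equals "find first match, else last parsed entry (falling back to the accumulator)"
lemma pvLoopA_eq (args : List (String × String)) :
    ∀ (ls : List String) (ret : Option (List (String × String))),
      pvLoopA args ls ret =
        match (pvParseB ls).find? (pvMatchB args) with
        | some e => (true, some e)
        | none =>
          (false, match (pvParseB ls).getLast? with
                  | some e => some e
                  | none => ret) := by
  intro ls
  induction ls with
  | nil => intro ret; simp [pvLoopA, pvParseB]
  | cons line rest ih =>
    intro ret
    by_cases hlen : 1 < PySem.Str.len line
    · rcases hts : PySem.Str.split₀ line with _ | ⟨t0, _ | ⟨t1, _ | ⟨t2, _ | ⟨t3, _ | ⟨t4, _ | ⟨t5, ts⟩⟩⟩⟩⟩⟩ <;>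
        simp only [pvLoopA, pvParseB, hts, if_pos hlen] <;>
        try exact ih ret
      by_cases hg : t0 = "GRT"
      · simp only [if_pos hg]
        have hm : pvMatchB args
            [("ret_found_dest", t2), ("ret_found_nh_beb", t3),
             ("ret_found_bvlan", t4), ("ret_found_out_int", t5)] = true ↔
            (t2 = pvLook args "dest" ∧ t3 = pvLook args "nh_beb" ∧
             t4 = pvLook args "bvlan" ∧ t5 = pvLook args "port") := by
          simp [pvMatchB, pvLook, PySem.Dict.getD, PySem.Dict.get?_mk_cons, and_assoc]
        by_cases hc : t2 = pvLook args "dest" ∧ t3 = pvLook args "nh_beb" ∧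
                      t4 = pvLook args "bvlan" ∧ t5 = pvLook args "port"
        · rw [if_pos hc]
          simp only [List.find?, hm.mpr hc]
        · rw [if_neg hc, ih]
          have hm' : pvMatchB args
              [("ret_found_dest", t2), ("ret_found_nh_beb", t3),
               ("ret_found_bvlan", t4), ("ret_found_out_int", t5)] = false := by
            cases h : pvMatchB args [("ret_found_dest", t2), ("ret_found_nh_beb", t3),
               ("ret_found_bvlan", t4), ("ret_found_out_int", t5)]
            · rfl
            · exact absurd (hm.mp h) hc
          simp only [List.find?, hm']
          cases hfind : (pvParseB rest).find? (pvMatchB args) with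
          | some e => simp
          | none =>
            cases hrest : pvParseB rest with
            | nil => simp [List.getLast?]
            | cons a l =>
              simp only [List.getLast?_cons_cons]
              cases hl : (a :: l).getLast? with
              | some x => simp
              | none => simp [List.getLast?_eq_none_iff] at hl
      · simp only [if_neg hg]; exact ih ret
    · simp only [pvLoopA, pvParseB, if_neg hlen]; exact ih ret

-- ===== VERDICT (by name: the statement is the Claim_ definition above) =====
theorem check_isis_spbm_ipv6_unicast_fib_out_port_spec : Claim_equal_check_isis_spbm_ipv6_unicast_fib_out_port := by
  intro output args _ _
  unfold Spec_check_isis_spbm_ipv6_unicast_fib_out_port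
  unfold check_isis_spbm_ipv6_unicast_fib_out_port check_isis_spbm_ipv6_unicast_fib_out_port_alt
  rw [pvLoopA_eq]
  cases hfind : (pvParseB (PySem.Str.splitlines output)).find? (pvMatchB args) with
  | some e => simp [hfind]
  | none =>
    simp only [hfind]
    cases hl : (pvParseB (PySem.Str.splitlines output)).getLast? <;> simp
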